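-- pv_equiv track=rewrite | github.com/blue-1-star/Py | Vas/e_ch5_08.py | decrypt_mg1
-- ===== SOURCE A (Python) =====
-- def shift_in_subset(D, sm, shift):  # D - dict for shifting, sm - incoming char, shift. Output - shifting char
--                                     # it is known that sm is already present in D as a value of some key
--     for k in D:
--         if D[k] == sm:
--             b=k          # Found the key position in the dictionary from which the shift will be performed
--             break
--     b = (b+shift)% len(D)
--     # if shift < 0:
--         # b = len(D) + shift
--     if shift == len(D):
--         b = 0
--     sym = D[b]
--     return sym
--
-- def decrypt_mg1(txu,D,Dcons,shift):
--     txd = str()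
--     tx=""
--     for c in txu:
--         if c in D.values():
--             A = D
--             tx+=shift_in_subset(A,c,shift)
--         elif c in Dcons.values():
--             A = Dcons
--             tx+=shift_in_subset(A,c,shift)
--         else:
--             tx+=c
--     return tx
-- ===== SOURCE B (Python) =====
-- def decrypt_mg1(txu, D, Dcons, shift):
--     def table_for(d):
--         t = {}
--         n = len(d)
--         for k, ch in d.items():
--             if ch in t:
--                 continue
--             b = 0 if shift == n else (k + shift) % n
--             if b in d:
--                 t[ch] = d[b]
--         return t
--     table = {**table_for(Dcons), **table_for(D)}
--     return ''.join(table.get(c, c) for c in txu)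
-- ===== Notes on version B (the rewrite author's own statement) =====
-- stated objective: faster
-- what changed: A runs, for every character, a two-branch membership test plus an inner linear scan over the chosen dict's keys; B precomputes one substitution table (first-matching key per value, Dcons entries overridden by D) and decrypts in a single uniform table-lookup pass.
import Mathlib
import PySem

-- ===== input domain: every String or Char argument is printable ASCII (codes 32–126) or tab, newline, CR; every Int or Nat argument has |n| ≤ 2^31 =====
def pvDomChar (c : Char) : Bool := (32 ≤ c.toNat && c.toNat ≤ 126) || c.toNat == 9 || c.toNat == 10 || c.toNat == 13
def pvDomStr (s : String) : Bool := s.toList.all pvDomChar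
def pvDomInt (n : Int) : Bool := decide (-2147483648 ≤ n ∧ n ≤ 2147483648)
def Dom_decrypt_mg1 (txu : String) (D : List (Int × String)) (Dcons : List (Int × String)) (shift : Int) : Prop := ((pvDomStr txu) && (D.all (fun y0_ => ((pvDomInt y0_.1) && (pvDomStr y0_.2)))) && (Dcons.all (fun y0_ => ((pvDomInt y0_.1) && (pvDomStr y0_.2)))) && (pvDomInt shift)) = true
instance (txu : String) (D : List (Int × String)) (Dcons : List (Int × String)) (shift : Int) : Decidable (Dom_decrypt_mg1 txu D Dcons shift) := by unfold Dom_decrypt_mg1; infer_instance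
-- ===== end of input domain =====

-- B replaces A's per-character branch-plus-inner-key-scan with one substitution table built
-- once from both dicts (D overwriting Dcons) and a single uniform lookup pass (objective: faster — the per-character inner scan disappears).

-- ===== PORT A =====
-- shift_in_subset: linear scan for the first key whose value is sm, then shifted lookup.
-- The 'none' find? branch is Python's NameError (unreachable: the caller checked membership);
-- get? = none is Python's KeyError — both are excluded by Pre_decrypt_mg1.
def pvShiftA (d : PySem.Dict Int String) (sm : String) (shift : Int) : List Char :=
  match d.items.find? (fun kv => kv.2 == sm) with
  | none => []
  | some kv =>
    let b0 := PySem.Int.mod (kv.1 + shift) (d.size : Int)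
    let b : Int := if shift = (d.size : Int) then 0 else b0
    ((d.get? b).getD "").toList

def decrypt_mg1 (txu : String) (D : List (Int × String)) (Dcons : List (Int × String)) (shift : Int) : String :=
  let d := PySem.Dict.ofList D
  let dc := PySem.Dict.ofList Dcons
  String.ofList (txu.toList.foldl (fun tx c =>
    if d.values.contains (String.ofList [c]) then tx ++ pvShiftA d (String.ofList [c]) shift
    else if dc.values.contains (String.ofList [c]) then tx ++ pvShiftA dc (String.ofList [c]) shift
    else tx ++ [c]) [])

-- ===== PORT B =====
-- table_for: one pass over the dict items, keeping the FIRST key for each value and storing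
-- its shifted target (entries whose shifted key is missing are skipped — A raises there).
def pvTableFor (d : PySem.Dict Int String) (shift : Int) : PySem.Dict String String :=
  d.items.foldl (fun t kv =>
    if t.contains kv.2 then t
    else
      let b : Int := if shift = (d.size : Int) then 0 else PySem.Int.mod (kv.1 + shift) (d.size : Int)
      match d.get? b with
      | some v => t.insert kv.2 v
      | none => t) PySem.Dict.empty

def decrypt_mg1_alt (txu : String) (D : List (Int × String)) (Dcons : List (Int × String)) (shift : Int) : String :=
  -- table = {**table_for(Dcons), **table_for(D)}
  let table := ((pvTableFor (PySem.Dict.ofList Dcons) shift).items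
      ++ (pvTableFor (PySem.Dict.ofList D) shift).items).foldl
      (fun t kv => t.insert kv.1 kv.2) PySem.Dict.empty
  -- ''.join(table.get(c, c) for c in txu)
  String.ofList ((txu.toList.map
    (fun c => ((table.get? (String.ofList [c])).getD (String.ofList [c])).toList)).flatten)

-- ===== PRECONDITION & SPEC =====
-- pvKeyOk d shift s: if some key of d has value s, the first such key, shifted by A's rule,
-- must again be a key of d (otherwise Python raises KeyError on d[b]).
def pvKeyOk (d : PySem.Dict Int String) (shift : Int) (s : String) : Bool :=
  match d.items.find? (fun kv => kv.2 == s) with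
  | none => true
  | some kv => d.contains (if shift = (d.size : Int) then 0 else PySem.Int.mod (kv.1 + shift) (d.size : Int))

-- Pre_ excludes exactly the inputs where A raises KeyError: a character of txu that is a value
-- of the dict chosen for it, but whose first matching key, shifted, is not a key of that dict.
def Pre_decrypt_mg1 (txu : String) (D : List (Int × String)) (Dcons : List (Int × String)) (shift : Int) : Prop :=
  (txu.toList.all (fun c =>
    if (PySem.Dict.ofList D).values.contains (String.ofList [c])
    then pvKeyOk (PySem.Dict.ofList D) shift (String.ofList [c])
    else pvKeyOk (PySem.Dict.ofList Dcons) shift (String.ofList [c]))) = true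
instance (txu : String) (D : List (Int × String)) (Dcons : List (Int × String)) (shift : Int) : Decidable (Pre_decrypt_mg1 txu D Dcons shift) := by unfold Pre_decrypt_mg1; infer_instance

def pvWitness_decrypt_mg1 : String × (List (Int × String)) × (List (Int × String)) × Int :=
  ("ab", [(0, "a"), (1, "b")], [], 1)

def Spec_decrypt_mg1 (txu : String) (D : List (Int × String)) (Dcons : List (Int × String)) (shift : Int) (out : String) : Prop := out = decrypt_mg1_alt txu D Dcons shift
instance (txu : String) (D : List (Int × String)) (Dcons : List (Int × String)) (shift : Int) (out : String) : Decidable (Spec_decrypt_mg1 txu D Dcons shift out) := by unfold Spec_decrypt_mg1; infer_instance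

-- ===== CLAIM (what is proved, stated in full; the proofs are below) =====
def Claim_equal_decrypt_mg1 : Prop := ∀ (txu : String) (D : List (Int × String)) (Dcons : List (Int × String)) (shift : Int), Dom_decrypt_mg1 txu D Dcons shift → Pre_decrypt_mg1 txu D Dcons shift → Spec_decrypt_mg1 txu D Dcons shift (decrypt_mg1 txu D Dcons shift)

-- ===== LEMMAS AND PROOFS =====

-- first-match spec of pvTableFor's fold: walk the items, at each item whose value is s take its
-- shifted target if it exists, otherwise keep walking.
def pvBspec (d : PySem.Dict Int String) (shift : Int) : List (Int × String) → String → Option String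
  | [], _ => none
  | kv :: r, s =>
    if kv.2 == s then
      match d.get? (if shift = (d.size : Int) then 0 else PySem.Int.mod (kv.1 + shift) (d.size : Int)) with
      | some v => some v
      | none => pvBspec d shift r s
    else pvBspec d shift r s

-- last-match spec of the merge fold
def pvMspec : List (String × String) → String → Option String
  | [], _ => none
  | kv :: r, s => (pvMspec r s).or (if kv.1 == s then some kv.2 else none)

theorem pvTableFor_fold_get? (d : PySem.Dict Int String) (shift : Int)
    (rest : List (Int × String)) (t : PySem.Dict String String) (s : String) :
    ((rest.foldl (fun t kv =>
      if t.contains kv.2 then t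
      else
        let b : Int := if shift = (d.size : Int) then 0 else PySem.Int.mod (kv.1 + shift) (d.size : Int)
        match d.get? b with
        | some v => t.insert kv.2 v
        | none => t) t).get? s) = (t.get? s).or (pvBspec d shift rest s) := by
  induction rest generalizing t with
  | nil => simp [pvBspec]
  | cons kv r ih =>
    simp only [List.foldl_cons, pvBspec]
    by_cases hc : t.contains kv.2
    · rw [if_pos hc, ih]
      by_cases hs : kv.2 = s
      · subst hs
        have : (t.get? kv.2).isSome := by rw [← PySem.Dict.contains_eq_isSome_get?]; exact hc
        obtain ⟨v, hv⟩ := Option.isSome_iff_exists.mp this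
        simp [hv]
      · simp [hs, (by simpa using hs : (kv.2 == s) = false)]
    · rw [if_neg hc]
      cases htgt : d.get? (if shift = (d.size : Int) then 0 else PySem.Int.mod (kv.1 + shift) (d.size : Int)) with
      | none =>
        simp only [htgt, ih]
        by_cases hs : kv.2 = s
        · subst hs; simp
        · simp [(by simpa using hs : (kv.2 == s) = false)]
      | some v =>
        simp only [htgt, ih]
        by_cases hs : kv.2 = s
        · subst hs
          have hn : t.get? kv.2 = none := by
            have := PySem.Dict.contains_eq_isSome_get? t kv.2
            rw [Bool.eq_false_iff.mpr hc] at this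
            exact Option.not_isSome_iff_eq_none.mp (by simp [← this])
          simp [PySem.Dict.get?_insert, hn]
        · have hins : (t.insert kv.2 v).get? s = t.get? s := by
            rw [PySem.Dict.get?_insert]
            exact if_neg (fun h => hs h.symm)
          simp [hins, (by simpa using hs : (kv.2 == s) = false)]

theorem pvTableFor_get? (d : PySem.Dict Int String) (shift : Int) (s : String) :
    (pvTableFor d shift).get? s = pvBspec d shift d.items s := by
  unfold pvTableFor
  rw [pvTableFor_fold_get?]
  simp [PySem.Dict.get?_empty]

theorem pvMerge_get? (ps : List (String × String)) (t : PySem.Dict String String) (s : String) :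
    ((ps.foldl (fun t kv => t.insert kv.1 kv.2) t).get? s) = (pvMspec ps s).or (t.get? s) := by
  induction ps generalizing t with
  | nil => simp [pvMspec]
  | cons kv r ih =>
    simp only [List.foldl_cons, pvMspec, ih]
    cases hm : pvMspec r s with
    | some v => simp
    | none =>
      by_cases hs : s = kv.1
      · simp [PySem.Dict.get?_insert, hs]
      · simp [PySem.Dict.get?_insert, hs, (by simpa using fun h => hs h.symm : (kv.1 == s) = false)]

theorem pvMspec_none (ps : List (String × String)) (s : String)
    (h : s ∉ ps.map Prod.fst) : pvMspec ps s = none := by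
  induction ps with
  | nil => rfl
  | cons kv r ih =>
    simp only [List.map_cons, List.mem_cons, not_or] at h
    simp [pvMspec, ih h.2, (by simpa using fun hh => h.1 hh.symm : (kv.1 == s) = false)]

theorem pvMspec_eq_get? (ps : List (String × String)) (s : String)
    (hnd : (ps.map Prod.fst).Nodup) : pvMspec ps s = (PySem.Dict.mk ps).get? s := by
  induction ps with
  | nil =>
    simp [pvMspec]
    rfl
  | cons kv r ih =>
    simp only [List.map_cons, List.nodup_cons] at hnd
    rw [PySem.Dict.get?_mk_cons]
    by_cases hs : kv.1 = s
    · subst hs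
      simp [pvMspec, pvMspec_none r kv.1 hnd.1]
    · simp [pvMspec, ih hnd.2, (by simpa using hs : (kv.1 == s) = false)]

-- the table's keys stay Nodup through the conditional insert fold
theorem pvTableFor_nodup_keys (d : PySem.Dict Int String) (shift : Int) :
    ((pvTableFor d shift).items.map Prod.fst).Nodup := by
  unfold pvTableFor
  have : ∀ (rest : List (Int × String)) (t : PySem.Dict String String), t.keys.Nodup →
      ((rest.foldl (fun t kv =>
        if t.contains kv.2 then t
        else
          let b : Int := if shift = (d.size : Int) then 0 else PySem.Int.mod (kv.1 + shift) (d.size : Int)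
          match d.get? b with
          | some v => t.insert kv.2 v
          | none => t) t).keys).Nodup := by
    intro rest
    induction rest with
    | nil => intro t ht; simpa using ht
    | cons kv r ih =>
      intro t ht
      simp only [List.foldl_cons]
      by_cases hc : t.contains kv.2
      · rw [if_pos hc]; exact ih t ht
      · rw [if_neg hc]
        cases htgt : d.get? (if shift = (d.size : Int) then 0 else PySem.Int.mod (kv.1 + shift) (d.size : Int)) with
        | none => simp only [htgt]; exact ih t ht
        | some v => simp only [htgt]; exact ih _ (PySem.Dict.nodup_keys_insert t kv.2 v ht)
  exact this d.items PySem.Dict.empty (by simp [PySem.Dict.keys_empty])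

theorem pvBspec_none (d : PySem.Dict Int String) (shift : Int) (s : String)
    (h : ∀ kv ∈ d.items, kv.2 ≠ s) : pvBspec d shift d.items s = none := by
  have : ∀ (l : List (Int × String)), (∀ kv ∈ l, kv.2 ≠ s) → pvBspec d shift l s = none := by
    intro l
    induction l with
    | nil => intro _; rfl
    | cons kv r ih =>
      intro hl
      have h1 : kv.2 ≠ s := hl kv (by simp)
      simp only [pvBspec, (by simpa using h1 : (kv.2 == s) = false), Bool.false_eq_true, if_false]
      exact ih (fun x hx => hl x (by simp [hx]))
  exact this d.items h

theorem pvBspec_of_find? (d : PySem.Dict Int String) (shift : Int) (s : String)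
    (kv : Int × String) (v : String)
    (hf : d.items.find? (fun kv => kv.2 == s) = some kv)
    (ht : d.get? (if shift = (d.size : Int) then 0 else PySem.Int.mod (kv.1 + shift) (d.size : Int)) = some v) :
    pvBspec d shift d.items s = some v := by
  have : ∀ (l : List (Int × String)), l.find? (fun kv => kv.2 == s) = some kv →
      pvBspec d shift l s = some v := by
    intro l
    induction l with
    | nil => intro h; simp at h
    | cons a r ih =>
      intro h
      by_cases ha : a.2 = s
      · have : a = kv := by
          rw [List.find?_cons_of_pos (by simpa using ha)] at h
          exact Option.some_injective _ h
        subst this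
        simp [pvBspec, ha, ht]
      · rw [List.find?_cons_of_neg (by simpa using ha)] at h
        simp only [pvBspec, (by simpa using ha : (a.2 == s) = false), Bool.false_eq_true, if_false]
        exact ih h
  exact this d.items hf

-- per-character agreement: under the character's pvKeyOk condition, A's branch result equals
-- B's table lookup
theorem pvChar_eq (D Dcons : List (Int × String)) (shift : Int) (c : Char)
    (hpre : (if (PySem.Dict.ofList D).values.contains (String.ofList [c])
      then pvKeyOk (PySem.Dict.ofList D) shift (String.ofList [c])
      else pvKeyOk (PySem.Dict.ofList Dcons) shift (String.ofList [c])) = true) :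
    (if (PySem.Dict.ofList D).values.contains (String.ofList [c])
      then pvShiftA (PySem.Dict.ofList D) (String.ofList [c]) shift
      else if (PySem.Dict.ofList Dcons).values.contains (String.ofList [c])
      then pvShiftA (PySem.Dict.ofList Dcons) (String.ofList [c]) shift
      else [c])
    = (((((pvTableFor (PySem.Dict.ofList Dcons) shift).items
        ++ (pvTableFor (PySem.Dict.ofList D) shift).items).foldl
        (fun t kv => t.insert kv.1 kv.2) PySem.Dict.empty).get? (String.ofList [c])).getD
        (String.ofList [c])).toList := by
  set s := String.ofList [c] with hs
  set d := PySem.Dict.ofList D with hd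
  set dc := PySem.Dict.ofList Dcons with hdc
  -- the merged table lookup
  have htab : ∀ x : String,
      (((pvTableFor dc shift).items ++ (pvTableFor d shift).items).foldl
        (fun t kv => t.insert kv.1 kv.2) PySem.Dict.empty).get? x
      = (pvBspec d shift d.items x).or (pvBspec dc shift dc.items x) := by
    intro x
    rw [pvMerge_get?]
    have hsplit : pvMspec ((pvTableFor dc shift).items ++ (pvTableFor d shift).items) x
        = (pvMspec ((pvTableFor d shift).items) x).or (pvMspec ((pvTableFor dc shift).items) x) := by
      generalize (pvTableFor dc shift).items = l1
      generalize (pvTableFor d shift).items = l2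
      induction l1 with
      | nil => simp [pvMspec]
      | cons kv r ih =>
        simp only [List.cons_append, pvMspec, ih, Option.or_assoc]
    rw [hsplit]
    rw [pvMspec_eq_get? _ _ (pvTableFor_nodup_keys d shift),
        pvMspec_eq_get? _ _ (pvTableFor_nodup_keys dc shift)]
    have e1 : PySem.Dict.mk (pvTableFor d shift).items = pvTableFor d shift := rfl
    have e2 : PySem.Dict.mk (pvTableFor dc shift).items = pvTableFor dc shift := rfl
    rw [e1, e2, pvTableFor_get?, pvTableFor_get?, PySem.Dict.get?_empty]
    simp
  -- membership in values ↔ an item with that value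
  have hval : ∀ (e : PySem.Dict Int String) (x : String),
      e.values.contains x = true ↔ ∃ kv ∈ e.items, kv.2 = x := by
    intro e x
    rw [List.contains_iff_mem]
    constructor
    · intro hx
      have : x ∈ e.items.map Prod.snd := by simpa [PySem.Dict.values] using hx
      obtain ⟨kv, hkv, hkx⟩ := List.mem_map.mp this
      exact ⟨kv, hkv, hkx⟩
    · rintro ⟨kv, hkv, rfl⟩
      have : kv.2 ∈ e.items.map Prod.snd := List.mem_map.mpr ⟨kv, hkv, rfl⟩
      simpa [PySem.Dict.values] using this
  by_cases h1 : d.values.contains s = true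
  · rw [if_pos h1] at hpre ⊢
    obtain ⟨kv0, hkv0, hv0⟩ := (hval d s).mp h1
    have hfind : (d.items.find? (fun kv => kv.2 == s)).isSome := by
      rw [List.find?_isSome]
      exact ⟨kv0, hkv0, by simpa using hv0⟩
    obtain ⟨kv, hkv⟩ := Option.isSome_iff_exists.mp hfind
    unfold pvKeyOk at hpre
    rw [hkv] at hpre
    have : ((d.get? (if shift = (d.size : Int) then 0 else PySem.Int.mod (kv.1 + shift) (d.size : Int)))).isSome := by
      rw [← PySem.Dict.contains_eq_isSome_get?]; exact hpre
    obtain ⟨v, hv⟩ := Option.isSome_iff_exists.mp this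
    rw [htab s, pvBspec_of_find? d shift s kv v hkv hv]
    unfold pvShiftA
    rw [hkv]
    simp only [hv]
    rfl
  · rw [if_neg h1] at hpre ⊢
    have hb1 : pvBspec d shift d.items s = none := by
      apply pvBspec_none
      intro kv hkv hc2
      exact h1 ((hval d s).mpr ⟨kv, hkv, hc2⟩)
    by_cases h2 : dc.values.contains s = true
    · rw [if_pos h2]
      obtain ⟨kv0, hkv0, hv0⟩ := (hval dc s).mp h2
      have hfind : (dc.items.find? (fun kv => kv.2 == s)).isSome := by
        rw [List.find?_isSome]
        exact ⟨kv0, hkv0, by simpa using hv0⟩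
      obtain ⟨kv, hkv⟩ := Option.isSome_iff_exists.mp hfind
      unfold pvKeyOk at hpre
      rw [hkv] at hpre
      have : ((dc.get? (if shift = (dc.size : Int) then 0 else PySem.Int.mod (kv.1 + shift) (dc.size : Int)))).isSome := by
        rw [← PySem.Dict.contains_eq_isSome_get?]; exact hpre
      obtain ⟨v, hv⟩ := Option.isSome_iff_exists.mp this
      rw [htab s, hb1, pvBspec_of_find? dc shift s kv v hkv hv]
      unfold pvShiftA
      rw [hkv]
      simp only [hv]
      rfl
    · rw [if_neg h2]
      have hb2 : pvBspec dc shift dc.items s = none := by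
        apply pvBspec_none
        intro kv hkv hc2
        exact h2 ((hval dc s).mpr ⟨kv, hkv, hc2⟩)
      rw [htab s, hb1, hb2]
      simp [hs]

-- ===== VERDICT (by name: the statement is the Claim_ definition above) =====
theorem decrypt_mg1_spec : Claim_equal_decrypt_mg1 := by
  intro txu D Dcons shift _ hpre
  unfold Spec_decrypt_mg1 decrypt_mg1 decrypt_mg1_alt
  simp only []
  -- turn A's fold into a flatMap
  have hstep : (fun (tx : List Char) (c : Char) =>
      if (PySem.Dict.ofList D).values.contains (String.ofList [c]) then
        tx ++ pvShiftA (PySem.Dict.ofList D) (String.ofList [c]) shift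
      else if (PySem.Dict.ofList Dcons).values.contains (String.ofList [c]) then
        tx ++ pvShiftA (PySem.Dict.ofList Dcons) (String.ofList [c]) shift
      else tx ++ [c])
      = (fun (tx : List Char) (c : Char) => tx ++
        (if (PySem.Dict.ofList D).values.contains (String.ofList [c]) then
          pvShiftA (PySem.Dict.ofList D) (String.ofList [c]) shift
        else if (PySem.Dict.ofList Dcons).values.contains (String.ofList [c]) then
          pvShiftA (PySem.Dict.ofList Dcons) (String.ofList [c]) shift
        else [c])) := by
    funext tx c
    split_ifs <;> rfl
  rw [hstep, PySem.List.foldl_append_eq_flatMap, ← List.flatMap_def]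
  have : ∀ c ∈ txu.toList,
      (if (PySem.Dict.ofList D).values.contains (String.ofList [c]) then
        pvShiftA (PySem.Dict.ofList D) (String.ofList [c]) shift
      else if (PySem.Dict.ofList Dcons).values.contains (String.ofList [c]) then
        pvShiftA (PySem.Dict.ofList Dcons) (String.ofList [c]) shift
      else [c])
      = (((((pvTableFor (PySem.Dict.ofList Dcons) shift).items
        ++ (pvTableFor (PySem.Dict.ofList D) shift).items).foldl
        (fun t kv => t.insert kv.1 kv.2) PySem.Dict.empty).get? (String.ofList [c])).getD
        (String.ofList [c])).toList := by
    intro c hc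
    apply pvChar_eq
    unfold Pre_decrypt_mg1 at hpre
    rw [List.all_eq_true] at hpre
    exact hpre c hc
  rw [List.nil_append, List.flatMap_congr this]
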